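-- pv_equiv track=rewrite | github.com/abravalheri/python-fastjsonschema | fastjsonschema/summary.py | _is_property
-- ===== SOURCE A (Python) =====
-- from typing import Callable, List, Optional, Union, Any, Iterator
--
-- def _is_property(path: List[str]):
--     """Check if the given path can correspond to an arbitrarily named property"""
--     if not path:
--         return False
--
--     counter = 0
--     for key in path[-2::-1]:
--         if key not in {"properties", "patternProperties"}:
--             break
--         counter += 1
--
--     # If the counter if even, the path correspond to a JSON Schema keyword
--     # otherwise it can be any arbitrary string naming a property
--     return counter % 2 == 1
-- ===== SOURCE B (Python) =====
-- def _is_property(path):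
--     """Check if the given path can correspond to an arbitrarily named property"""
--     counter = 0
--     for key in path[:-1]:
--         if key in ("properties", "patternProperties"):
--             counter += 1
--         else:
--             counter = 0
--     return counter % 2 == 1
-- ===== Notes on version B (the rewrite author's own statement) =====
-- stated objective: simpler
-- what changed: Replaces the backward scan with early break over path[-2::-1] by a single forward pass over path[:-1] maintaining a reset-on-mismatch run counter (the empty-path guard becomes unnecessary and is dropped).
import Mathlib
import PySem

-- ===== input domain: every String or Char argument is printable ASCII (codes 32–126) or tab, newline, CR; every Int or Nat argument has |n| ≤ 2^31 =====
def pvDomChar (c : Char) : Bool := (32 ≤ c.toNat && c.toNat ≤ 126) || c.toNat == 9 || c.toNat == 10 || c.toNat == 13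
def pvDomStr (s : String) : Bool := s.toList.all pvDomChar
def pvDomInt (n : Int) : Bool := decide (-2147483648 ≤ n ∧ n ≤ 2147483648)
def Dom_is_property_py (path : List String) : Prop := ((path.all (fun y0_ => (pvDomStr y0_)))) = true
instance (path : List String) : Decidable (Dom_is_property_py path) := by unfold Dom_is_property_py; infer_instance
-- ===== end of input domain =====

-- B replaces A's backward early-break scan over path[-2::-1] by one forward pass over
-- path[:-1] with a reset-on-mismatch run counter (objective: simpler).


-- ===== PORT A =====
-- A's for-loop with break: count the leading run of keyword keys, stop at the first other key.
def pvRunCount : List String → Nat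
  | [] => 0
  | k :: rest =>
      if k == "properties" || k == "patternProperties" then pvRunCount rest + 1 else 0

def is_property_py (path : List String) : Bool :=
  if path = [] then false
  else
    -- path[-2::-1]; the step is -1 ≠ 0, so slice? is always `some`
    let rev := (PySem.List.slice? path (some (-2)) none (-1)).getD []
    pvRunCount rev % 2 == 1

-- ===== PORT B =====
def is_property_py_alt (path : List String) : Bool :=
  ((PySem.List.slice path none (some (-1))).foldl
      (fun c k => if k == "properties" || k == "patternProperties" then c + 1 else 0)
      0) % 2 == 1

-- ===== PRECONDITION & SPEC =====
def Spec_is_property_py (path : List String) (out : Bool) : Prop := out = is_property_py_alt path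
instance (path : List String) (out : Bool) : Decidable (Spec_is_property_py path out) := by unfold Spec_is_property_py; infer_instance

-- ===== CLAIM (what is proved, stated in full; the proofs are below) =====
def Claim_equal_is_property_py : Prop := ∀ (path : List String), Dom_is_property_py path → Spec_is_property_py path (is_property_py path)

-- ===== LEMMAS AND PROOFS =====

-- filterMap of getElem? over the index range rebuilds the list
theorem pv_filterMap_range {α : Type} (l : List α) :
    List.filterMap (fun i => l[i]?) (List.range l.length) = l := by
  induction l using List.reverseRecOn with
  | nil => simp
  | append_singleton l a ih =>
    rw [List.length_append, List.length_singleton, List.range_succ, List.filterMap_append]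
    have h1 : List.filterMap (fun i => (l ++ [a])[i]?) (List.range l.length)
        = List.filterMap (fun i => l[i]?) (List.range l.length) := by
      apply List.filterMap_congr
      intro x hx
      rw [List.mem_range] at hx
      rw [List.getElem?_append_left hx]
    rw [h1, ih]
    simp

-- xs[-2::-1] = reverse of xs without its last element
theorem pv_slice_neg2 {α : Type} (xs : List α) :
    PySem.List.slice? xs (some (-2)) none (-1) = some xs.dropLast.reverse := by
  unfold PySem.List.slice? PySem.List.sliceIndices
  norm_num
  by_cases h : 1 < xs.length
  · rw [if_pos h]
    have hm : (max (-2 + (xs.length : Int)) (-1) + 1).toNat = xs.length - 1 := by omega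
    rw [hm]
    have hcong : ∀ x ∈ List.range (xs.length - 1),
        xs[(max (-2 + (xs.length : Int)) (-1) + -(x : Int)).toNat]? = xs.dropLast.reverse[x]? := by
      intro x hx
      rw [List.mem_range] at hx
      have hidx : (max (-2 + (xs.length : Int)) (-1) + -(x : Int)).toNat = xs.length - 2 - x := by
        omega
      rw [hidx, List.getElem?_reverse (by simp; omega), List.getElem?_dropLast]
      simp
      rw [if_pos (by omega)]
      congr 2
    rw [List.filterMap_congr hcong]
    have hlen : xs.length - 1 = xs.dropLast.reverse.length := by simp
    rw [hlen, pv_filterMap_range]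
  · rw [if_neg h]
    have : xs.dropLast = [] := by
      cases xs with
      | nil => rfl
      | cons a t =>
        cases t with
        | nil => rfl
        | cons b u => simp at h
    simp [this]

-- B's forward reset-counter fold computes the length of the keyword prefix of the reversal
theorem pv_foldl_eq_runCount (l : List String) :
    l.foldl (fun c k => if k == "properties" || k == "patternProperties" then c + 1 else 0) 0
      = pvRunCount l.reverse := by
  induction l using List.reverseRecOn with
  | nil => rfl
  | append_singleton l a ih =>
    rw [List.foldl_append, List.reverse_append]
    simp only [List.foldl_cons, List.foldl_nil, List.reverse_cons, List.reverse_nil,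
      List.nil_append, List.singleton_append, pvRunCount]
    by_cases h : a == "properties" || a == "patternProperties"
    · rw [if_pos h, if_pos h, ih]
    · rw [if_neg h, if_neg h]

-- ===== VERDICT (by name: the statement is the Claim_ definition above) =====
theorem is_property_py_spec : Claim_equal_is_property_py := by
  intro path _
  unfold Spec_is_property_py is_property_py is_property_py_alt
  rw [pv_slice_neg2, PySem.List.slice_to_neg_one, pv_foldl_eq_runCount]
  by_cases h : path = []
  · subst h
    rfl
  · rw [if_neg h]
    rfl
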